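-- pv_equiv track=rewrite | github.com/vivianvvang/coding2026 | uber/PS/564.find-the-closest-palindrome.py | half_to_palindrome
-- ===== SOURCE A (Python) =====
-- def half_to_palindrome(left: int, even: bool) -> int:
--     res = left
--     if not even:
--         left = left // 10
--     while left > 0:
--         res = left % 10 + res * 10
--         left //= 10
--     return res
-- ===== SOURCE B (Python) =====
-- def half_to_palindrome(left: int, even: bool) -> int:
--     def mirror(n):
--         # returns (10 ** number_of_digits(n), value of n's digits reversed); (1, 0) for n <= 0
--         if n <= 0:
--             return (1, 0)
--         p, r = mirror(n // 10)
--         return (10 * p, n % 10 * p + r)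
--     p, r = mirror(left if even else left // 10)
--     return left * p + r
-- ===== Notes on version B (the rewrite author's own statement) =====
-- stated objective: alternative
-- what changed: Replaces A's destructive while-loop that threads the growing result through an accumulator with a pure structural recursion computing the pair (10^digits, reversed-digit value) of the half, combined by a single multiply-add at the end.
import Mathlib
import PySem

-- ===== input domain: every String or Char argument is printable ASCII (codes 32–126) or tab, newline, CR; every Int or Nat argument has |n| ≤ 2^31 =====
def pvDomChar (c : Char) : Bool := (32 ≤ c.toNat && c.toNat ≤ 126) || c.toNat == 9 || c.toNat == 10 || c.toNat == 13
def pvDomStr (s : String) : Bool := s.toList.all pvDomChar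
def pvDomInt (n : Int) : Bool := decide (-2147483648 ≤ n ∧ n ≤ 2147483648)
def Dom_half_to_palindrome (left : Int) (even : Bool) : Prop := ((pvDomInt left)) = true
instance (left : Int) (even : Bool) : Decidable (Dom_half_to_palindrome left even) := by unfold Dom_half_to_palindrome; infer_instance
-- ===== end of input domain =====

-- B replaces A's accumulator while-loop with a pure structural recursion returning the pair
-- (10^digits, reversed-digit value) of the half, combined by one multiply-add (alternative decomposition, same cost).


-- ===== PORT A =====
-- the 'while left > 0' loop of A, threading the accumulator res
def pvHalfLoop (left res : Int) : Int :=
  if left > 0 then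
    pvHalfLoop (PySem.Int.floordiv left 10) (PySem.Int.mod left 10 + res * 10)
  else res
termination_by left.toNat
decreasing_by
  rename_i h
  rw [PySem.Int.floordiv_eq_ediv_of_pos (by omega)]
  omega

def half_to_palindrome (left : Int) (even : Bool) : Int :=
  let res := left
  let left := if !even then PySem.Int.floordiv left 10 else left
  pvHalfLoop left res

-- ===== PORT B =====
-- mirror n = (10 ** number_of_digits(n), value of n's digits reversed); (1, 0) for n <= 0
def pvMirror (n : Int) : Int × Int :=
  if n > 0 then
    let pr := pvMirror (PySem.Int.floordiv n 10)
    (10 * pr.1, PySem.Int.mod n 10 * pr.1 + pr.2)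
  else (1, 0)
termination_by n.toNat
decreasing_by
  rename_i h
  rw [PySem.Int.floordiv_eq_ediv_of_pos (by omega)]
  omega

def half_to_palindrome_alt (left : Int) (even : Bool) : Int :=
  let pr := pvMirror (if even then left else PySem.Int.floordiv left 10)
  left * pr.1 + pr.2

-- ===== PRECONDITION & SPEC =====
def Spec_half_to_palindrome (left : Int) (even : Bool) (out : Int) : Prop := out = half_to_palindrome_alt left even
instance (left : Int) (even : Bool) (out : Int) : Decidable (Spec_half_to_palindrome left even out) := by unfold Spec_half_to_palindrome; infer_instance

-- ===== CLAIM (what is proved, stated in full; the proofs are below) =====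
def Claim_equal_half_to_palindrome : Prop := ∀ (left : Int) (even : Bool), Dom_half_to_palindrome left even → Spec_half_to_palindrome left even (half_to_palindrome left even)

-- ===== LEMMAS AND PROOFS =====

-- A's loop equals res scaled by the mirror's power plus the mirrored value
theorem pvHalfLoop_eq_mirror (n res : Int) :
    pvHalfLoop n res = res * (pvMirror n).1 + (pvMirror n).2 := by
  rw [pvHalfLoop, pvMirror]
  split
  · rename_i h
    rw [pvHalfLoop_eq_mirror (PySem.Int.floordiv n 10) (PySem.Int.mod n 10 + res * 10)]
    simp only
    ring
  · simp
termination_by n.toNat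
decreasing_by
  rename_i h
  rw [PySem.Int.floordiv_eq_ediv_of_pos (by omega)]
  omega

-- ===== VERDICT (by name: the statement is the Claim_ definition above) =====
theorem half_to_palindrome_spec : Claim_equal_half_to_palindrome := by
  intro left even _
  unfold Spec_half_to_palindrome half_to_palindrome half_to_palindrome_alt
  cases even <;> simp [pvHalfLoop_eq_mirror]
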